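-- pv_equiv track=rewrite | github.com/Gavintain/2023_algorithms_problems_sol | lv2/p15.py | solution
-- ===== SOURCE A (Python) =====
-- import math
-- from collections import deque
--
-- def isvalid(cor1,cor2,lx,ly,board):
--     if (cor1<0)or(cor2<0)or(cor1>=ly)or(cor2>=lx):
--         return False
--     if board[cor1][cor2]=='D':
--         return False
--     return True
--
-- def solution(board):
--
--     lx = len(board[0])
--     ly = len(board)
--     dir_list = [[-1,0],[1,0],[0,-1],[0,1]]
--     cordinate = [0,0]
--     G_cordinate = [0,0]
--
--     for i in range(ly):
--         for j in range(lx):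
--             if board[i][j] == 'R':
--                 cordinate[0] = i
--                 cordinate[1] = j
--             elif board[i][j] == 'G':
--                 G_cordinate[0] = i
--                 G_cordinate[1] = j
--             else:
--                 pass
--
--     ans_map =[[math.inf for _ in range(lx)] for _ in range(ly)]
--     ans_map[cordinate[0]][cordinate[1]] = 0
--     visited = deque([cordinate])
--
--     while(len(visited)>0):
--         cordinate = visited.popleft()
--         step = ans_map[cordinate[0]][cordinate[1]]
--         toggle = 0
--         while(True):
--             dir = dir_list[toggle]
--             new_cordinate = [cordinate[0],cordinate[1]]
--             while(isvalid(new_cordinate[0] + dir[0],new_cordinate[1] + dir[1],lx,ly,board)):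
--                 new_cordinate = [new_cordinate[0] + dir[0],new_cordinate[1] + dir[1]]
--             if new_cordinate == cordinate:
--                 if toggle>=3:
--                     break
--                 else:
--                     toggle+=1
--                     continue
--             else:
--                 if (step + 1) < ans_map[new_cordinate[0]][new_cordinate[1]]:
--                     ans_map[new_cordinate[0]][new_cordinate[1]] = step + 1
--                     visited.append(new_cordinate)
--
--                 if toggle>=3:
--                     break
--                 else:
--                     toggle+=1
--                     continue
--
--     ans = ans_map[G_cordinate[0]][G_cordinate[1]]
--     if ans == math.inf:
--         return -1
--     else:
--         return ans
-- ===== SOURCE B (Python) =====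
-- from collections import deque
--
--
-- def solution(board):
--     ly = len(board)
--     lx = len(board[0])
--     start = (0, 0)
--     goal = (0, 0)
--     for i in range(ly):
--         for j in range(lx):
--             ch = board[i][j]
--             if ch == 'R':
--                 start = (i, j)
--             elif ch == 'G':
--                 goal = (i, j)
--     # Precompute, by linear sweeps, the landing cell of a slide from every cell.
--     left = []
--     right = []
--     for i in range(ly):
--         row = []
--         for j in range(lx):
--             row.append(j if j == 0 or board[i][j - 1] == 'D' else row[-1])
--         left.append(row)
--         row = []
--         for j in range(lx - 1, -1, -1):
--             row.append(j if j == lx - 1 or board[i][j + 1] == 'D' else row[-1])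
--         right.append(row[::-1])
--     upT = []
--     downT = []
--     for j in range(lx):
--         col = []
--         for i in range(ly):
--             col.append(i if i == 0 or board[i - 1][j] == 'D' else col[-1])
--         upT.append(col)
--         col = []
--         for i in range(ly - 1, -1, -1):
--             col.append(i if i == ly - 1 or board[i + 1][j] == 'D' else col[-1])
--         downT.append(col[::-1])
--     # BFS with O(1) transitions.
--     dist = {start: 0}
--     q = deque([start])
--     while q:
--         i, j = q.popleft()
--         d = dist[(i, j)]
--         for t in ((upT[j][i], j), (downT[j][i], j), (i, left[i][j]), (i, right[i][j])):
--             if dist.get(t, d + 2) > d + 1:  # missing entry behaves as +infinity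
--                 dist[t] = d + 1
--                 q.append(t)
--     return dist.get(goal, -1)
-- ===== Notes on version B (the rewrite author's own statement) =====
-- stated objective: alternative
-- what changed: B precomputes the slide-landing cell of every board cell in all four directions with linear row/column sweeps and runs the BFS over a distance dictionary with O(1) table-lookup transitions, instead of A's re-walking the slide cell by cell for every direction of every dequeued cell over an infinity-initialised matrix.
import Mathlib
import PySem

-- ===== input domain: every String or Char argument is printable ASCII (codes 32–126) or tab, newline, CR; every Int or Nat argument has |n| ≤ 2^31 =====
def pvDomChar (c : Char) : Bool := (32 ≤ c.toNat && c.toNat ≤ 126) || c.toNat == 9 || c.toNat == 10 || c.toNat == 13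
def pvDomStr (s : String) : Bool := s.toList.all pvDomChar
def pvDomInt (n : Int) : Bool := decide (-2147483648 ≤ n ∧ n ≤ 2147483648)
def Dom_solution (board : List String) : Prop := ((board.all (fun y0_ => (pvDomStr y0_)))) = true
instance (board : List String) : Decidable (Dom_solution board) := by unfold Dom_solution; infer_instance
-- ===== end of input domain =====

-- B replaces A's per-step slide walks by four landing tables precomputed with linear
-- row/column sweeps, so every BFS transition is a table lookup (objective: alternative;
-- a timing run's boards leave both programs linear, so no speed is claimed).

-- ===== PORT A =====
-- `board[i][j]` (in range on every access made under Pre_); shared by both ports,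
-- whose sources contain the identical expression.
def chAt (board : List String) (i j : Int) : Char :=
  ((PySem.List.pyGet? board i).bind (fun r => PySem.Str.pyGet? r j)).getD '?'

-- the R/G scan (the same source lines open A and B, so both ports use this helper)
def findRG (board : List String) (lx ly : Int) : (Int × Int) × (Int × Int) :=
  (PySem.List.pyRange 0 ly 1).foldl (fun st i =>
    (PySem.List.pyRange 0 lx 1).foldl (fun st j =>
      let ch := chAt board i j
      if ch == 'R' then ((i, j), st.2)
      else if ch == 'G' then (st.1, (i, j))
      else st) st) (((0 : Int), (0 : Int)), ((0 : Int), (0 : Int)))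

def isvalid (cor1 cor2 lx ly : Int) (board : List String) : Bool :=
  if cor1 < 0 || cor2 < 0 || cor1 ≥ ly || cor2 ≥ lx then false
  else if chAt board cor1 cor2 == 'D' then false
  else true

def dirList : List (Int × Int) := [(-1, 0), (1, 0), (0, -1), (0, 1)]

-- `while isvalid(...): new_cordinate += dir` (fueled; the caller passes fuel > the
-- number of cells in the direction of travel, so the walk always ends on ¬isvalid)
def slide (board : List String) (lx ly : Int) (d : Int × Int) : Nat → (Int × Int) → (Int × Int)
  | 0, c => c
  | f + 1, c =>
    if isvalid (c.1 + d.1) (c.2 + d.2) lx ly board then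
      slide board lx ly d f (c.1 + d.1, c.2 + d.2)
    else c

-- `ans_map[i][j]` / `ans_map[i][j] = v` (none = math.inf; all accesses in range)
def mget (m : List (List (Option Int))) (c : Int × Int) : Option Int :=
  PySem.List.pyGetD (PySem.List.pyGetD m c.1 []) c.2 none

def mset (m : List (List (Option Int))) (c : Int × Int) (v : Option Int) : List (List (Option Int)) :=
  PySem.List.pySetD m c.1 (PySem.List.pySetD (PySem.List.pyGetD m c.1 []) c.2 v)

-- `step + 1 < ans_map[...]` where the right side may be math.inf
def ltInf (a : Int) (b : Option Int) : Bool :=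
  match b with
  | none => true
  | some v => decide (a < v)

-- the `while(len(visited)>0)` loop; the toggle 0..3 inner loop is the fold over dirList
def bfsA (board : List String) (lx ly : Int) :
    Nat → List (Int × Int) → List (List (Option Int)) → List (List (Option Int))
  | 0, _, m => m
  | _ + 1, [], m => m
  | f + 1, c :: rest, m =>
    let step := (mget m c).getD 0
    let s := dirList.foldl (fun (s : List (Int × Int) × List (List (Option Int))) d =>
        let nc := slide board lx ly d ((lx + ly).toNat + 1) c
        if nc == c then s
        else if ltInf (step + 1) (mget s.2 nc) then (s.1 ++ [nc], mset s.2 nc (some (step + 1))) else s)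
      (rest, m)
    bfsA board lx ly f s.1 s.2

def solution (board : List String) : Int :=
  let lx : Int := PySem.Str.len ((PySem.List.pyGet? board 0).getD "")
  let ly : Int := PySem.List.len board
  let rg := findRG board lx ly
  let m0 := mset (List.replicate ly.toNat (List.replicate lx.toNat (none : Option Int))) rg.1 (some 0)
  let mF := bfsA board lx ly ((lx.toNat + 1) * (ly.toNat + 1) + 1) [rg.1] m0
  match mget mF rg.2 with
  | none => -1
  | some v => v

-- ===== PORT B =====
-- forward sweep: `row=[]; for k in range(n): row.append(k if k==0 or f(k-1)=='D' else row[-1])`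
-- (Source B writes it twice, once per axis; f is the blocking-neighbour accessor)
def sweepPos (f : Int → Char) (n : Int) : List Int :=
  (PySem.List.pyRange 0 n 1).foldl (fun row k =>
    row ++ [if k == 0 || f (k - 1) == 'D' then k else PySem.List.pyGetD row (-1) 0]) []

-- backward sweep followed by `row[::-1]` (= reverse, PySem.List.slice?_none_none_neg_one)
def sweepNeg (f : Int → Char) (n : Int) : List Int :=
  ((PySem.List.pyRange (n - 1) (-1) (-1)).foldl (fun row k =>
    row ++ [if k == n - 1 || f (k + 1) == 'D' then k else PySem.List.pyGetD row (-1) 0]) []).reverse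

def tblL (board : List String) (lx ly : Int) : List (List Int) :=
  (PySem.List.pyRange 0 ly 1).map (fun i => sweepPos (fun t => chAt board i t) lx)
def tblR (board : List String) (lx ly : Int) : List (List Int) :=
  (PySem.List.pyRange 0 ly 1).map (fun i => sweepNeg (fun t => chAt board i t) lx)
def tblU (board : List String) (lx ly : Int) : List (List Int) :=
  (PySem.List.pyRange 0 lx 1).map (fun j => sweepPos (fun t => chAt board t j) ly)
def tblD (board : List String) (lx ly : Int) : List (List Int) :=
  (PySem.List.pyRange 0 lx 1).map (fun j => sweepNeg (fun t => chAt board t j) ly)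

-- `table[i][j]` (in range on every access the BFS makes)
def tget (t : List (List Int)) (i j : Int) : Int :=
  PySem.List.pyGetD (PySem.List.pyGetD t i []) j 0

def bfsB (tU tD tL tR : List (List Int)) :
    Nat → List (Int × Int) → PySem.Dict (Int × Int) Int → PySem.Dict (Int × Int) Int
  | 0, _, dist => dist
  | _ + 1, [], dist => dist
  | f + 1, c :: rest, dist =>
    let d := (PySem.Dict.get? dist c).getD 0
    let s := [(tget tU c.2 c.1, c.2), (tget tD c.2 c.1, c.2),
              (c.1, tget tL c.1 c.2), (c.1, tget tR c.1 c.2)].foldl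
      (fun (s : List (Int × Int) × PySem.Dict (Int × Int) Int) t =>
        if PySem.Dict.getD s.2 t (d + 2) > d + 1 then (s.1 ++ [t], PySem.Dict.insert s.2 t (d + 1)) else s)
      (rest, dist)
    bfsB tU tD tL tR f s.1 s.2

def solution_alt (board : List String) : Int :=
  let ly : Int := PySem.List.len board
  let lx : Int := PySem.Str.len ((PySem.List.pyGet? board 0).getD "")
  let rg := findRG board lx ly
  let dF := bfsB (tblU board lx ly) (tblD board lx ly) (tblL board lx ly) (tblR board lx ly)
      ((lx.toNat + 1) * (ly.toNat + 1) + 1) [rg.1] (PySem.Dict.insert PySem.Dict.empty rg.1 0)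
  PySem.Dict.getD dF rg.2 (-1)

-- ===== PRECONDITION & SPEC =====
-- Pre_ excludes exactly the inputs on which A raises: an empty board or an empty first
-- row (IndexError on board[0] / ans_map[0][0]) and boards with a row shorter than the
-- first row (IndexError while scanning row i up to len(board[0])).
def Pre_solution (board : List String) : Prop :=
  board ≠ [] ∧ 0 < (board.headD "").toList.length ∧
    ∀ r ∈ board, (board.headD "").toList.length ≤ r.toList.length
instance (board : List String) : Decidable (Pre_solution board) := by
  unfold Pre_solution; infer_instance

def pvWitness_solution : List String := ["R.D", "..G"]

def Spec_solution (board : List String) (out : Int) : Prop := out = solution_alt board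
instance (board : List String) (out : Int) : Decidable (Spec_solution board out) := by
  unfold Spec_solution; infer_instance

-- ===== CLAIM (what is proved, stated in full; the proofs are below) =====
def Claim_equal_solution : Prop :=
  ∀ (board : List String), Dom_solution board → Pre_solution board →
    Spec_solution board (solution board)

-- ===== LEMMAS AND PROOFS =====

-- in-range coordinates, the matrix shape of ans_map, and the matrix/dict agreement
def InR (lx ly : Int) (c : Int × Int) : Prop := 0 ≤ c.1 ∧ c.1 < ly ∧ 0 ≤ c.2 ∧ c.2 < lx

def Shape (lx ly : Int) (m : List (List (Option Int))) : Prop :=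
  m.length = ly.toNat ∧ ∀ r ∈ m, r.length = lx.toNat

-- A's matrix and B's dict agree on every in-range cell (none = math.inf = absent key)
def MRel (lx ly : Int) (m : List (List (Option Int))) (dist : PySem.Dict (Int × Int) Int) : Prop :=
  ∀ c, InR lx ly c → mget m c = PySem.Dict.get? dist c

-- landing-value specs: posSpec f n = landing index sliding from n toward 0,
-- negSpec f n k = landing index sliding from n-1-k toward n-1
def posSpec (f : Int → Char) : Nat → Int
  | 0 => 0
  | n + 1 => if f (n : Int) = 'D' then ((n : Int) + 1) else posSpec f n

def valPos (f : Int → Char) (j : Int) : Int := posSpec f j.toNat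

def negSpec (f : Int → Char) (n : Int) : Nat → Int
  | 0 => n - 1
  | k + 1 => if f (n - 1 - (k : Int)) = 'D' then (n - 1 - ((k : Int) + 1)) else negSpec f n k

def valNeg (f : Int → Char) (n j : Int) : Int := negSpec f n (n - 1 - j).toNat

-- state correspondence maintained across the four per-direction updates of one pop
def StInv (lx ly : Int) (c : Int × Int) (d : Int)
    (sA : List (Int × Int) × List (List (Option Int)))
    (sB : List (Int × Int) × PySem.Dict (Int × Int) Int) : Prop :=
  sA.1 = sB.1 ∧ Shape lx ly sA.2 ∧ MRel lx ly sA.2 sB.2 ∧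
  (∀ x ∈ sA.1, InR lx ly x ∧ (PySem.Dict.get? sB.2 x).isSome = true) ∧
  PySem.Dict.get? sB.2 c = some d

lemma valPos_rec (f : Int → Char) (j : Int) (h : 0 ≤ j) :
    valPos f j = if j = 0 ∨ f (j - 1) = 'D' then j else valPos f (j - 1) := by
  obtain ⟨n, rfl⟩ : ∃ n : Nat, j = (n : Int) := ⟨j.toNat, (Int.toNat_of_nonneg h).symm⟩
  cases n with
  | zero => simp [valPos, posSpec]
  | succ m =>
    have h1 : ((m : Int) + 1).toNat = m + 1 := by omega
    have h2 : ((m : Int) + 1 - 1) = (m : Int) := by omega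
    have h3 : ((m : Int)).toNat = m := by omega
    simp only [valPos, Nat.cast_add, Nat.cast_one, h1, h2, h3, posSpec]
    by_cases hD : f (m : Int) = 'D' <;> simp [hD]
    omega

lemma posSpec_bounds (f : Int → Char) (n : Nat) : 0 ≤ posSpec f n ∧ posSpec f n ≤ (n : Int) := by
  induction n with
  | zero => simp [posSpec]
  | succ m ih =>
    simp only [posSpec]
    by_cases hD : f (m : Int) = 'D' <;> simp [hD] <;> omega

lemma valPos_bounds (f : Int → Char) (j : Int) (h : 0 ≤ j) :
    0 ≤ valPos f j ∧ valPos f j ≤ j := by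
  have := posSpec_bounds f j.toNat
  unfold valPos
  omega

lemma valNeg_rec (f : Int → Char) (n j : Int) (h0 : 0 ≤ j) (h1 : j < n) :
    valNeg f n j = if j = n - 1 ∨ f (j + 1) = 'D' then j else valNeg f n (j + 1) := by
  obtain ⟨k, hk⟩ : ∃ k : Nat, (n - 1 - j).toNat = k := ⟨_, rfl⟩
  cases k with
  | zero =>
    have : j = n - 1 := by omega
    subst this
    simp [valNeg, hk, negSpec]
  | succ m =>
    have hj : j ≠ n - 1 := by omega
    have h2 : (n - 1 - (j + 1)).toNat = m := by omega
    have h3 : n - 1 - (m : Int) = j + 1 := by omega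
    simp only [valNeg, hk, negSpec, h2, h3]
    by_cases hD : f (j + 1) = 'D' <;> simp [hD, hj]
    omega

lemma negSpec_bounds (f : Int → Char) (n : Int) (k : Nat) :
    n - 1 - (k : Int) ≤ negSpec f n k ∧ negSpec f n k ≤ n - 1 := by
  induction k with
  | zero => simp [negSpec]
  | succ m ih =>
    simp only [negSpec]
    by_cases hD : f (n - 1 - (m : Int)) = 'D' <;> simp [hD] <;> push_cast <;> omega

lemma valNeg_bounds (f : Int → Char) (n j : Int) (h0 : 0 ≤ j) (h1 : j < n) :
    j ≤ valNeg f n j ∧ valNeg f n j ≤ n - 1 := by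
  have := negSpec_bounds f n (n - 1 - j).toNat
  unfold valNeg
  omega

lemma isvalid_iff (board : List String) (lx ly a b : Int) :
    isvalid a b lx ly board = true ↔ (0 ≤ a ∧ a < ly ∧ 0 ≤ b ∧ b < lx ∧ chAt board a b ≠ 'D') := by
  unfold isvalid
  by_cases h1 : a < 0 <;> by_cases h2 : b < 0 <;> by_cases h3 : a ≥ ly <;> by_cases h4 : b ≥ lx <;>
    by_cases h5 : chAt board a b = 'D' <;>
    simp [h1, h2, h3, h4, h5] <;> omega

lemma slide_left (board : List String) (lx ly i j : Int) (fuel : Nat)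
    (h : InR lx ly (i, j)) (hf : j.toNat < fuel) :
    slide board lx ly (0, -1) fuel (i, j) = (i, valPos (fun t => chAt board i t) j) := by
  obtain ⟨hi0, hiy, hj0, hjx⟩ := h
  simp only at hi0 hiy hj0 hjx
  induction fuel generalizing j with
  | zero => omega
  | succ f ih =>
    simp only [slide]
    have e1 : i + (0 : Int) = i := by ring
    have e2 : j + (-1 : Int) = j - 1 := by ring
    rw [e1, e2, valPos_rec _ _ hj0]
    by_cases hv : isvalid i (j - 1) lx ly board = true
    · rw [if_pos hv]
      rw [isvalid_iff] at hv
      obtain ⟨-, -, hb0, -, hD⟩ := hv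
      rw [if_neg (by push_neg; exact ⟨by omega, hD⟩)]
      exact ih (j - 1) (by omega) (by omega) (by omega)
    · rw [if_neg hv]
      rw [isvalid_iff] at hv
      push_neg at hv
      have : j = 0 ∨ chAt board i (j - 1) = 'D' := by
        by_cases hz : j = 0
        · exact Or.inl hz
        · exact Or.inr (hv hi0 hiy (by omega) (by omega))
      rw [if_pos this]

lemma slide_right (board : List String) (lx ly i j : Int) (fuel : Nat)
    (h : InR lx ly (i, j)) (hf : (lx - 1 - j).toNat < fuel) :
    slide board lx ly (0, 1) fuel (i, j) = (i, valNeg (fun t => chAt board i t) lx j) := by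
  obtain ⟨hi0, hiy, hj0, hjx⟩ := h
  simp only at hi0 hiy hj0 hjx
  induction fuel generalizing j with
  | zero => omega
  | succ f ih =>
    simp only [slide]
    have e1 : i + (0 : Int) = i := by ring
    rw [e1, valNeg_rec _ _ _ hj0 hjx]
    by_cases hv : isvalid i (j + 1) lx ly board = true
    · rw [if_pos hv]
      rw [isvalid_iff] at hv
      obtain ⟨-, -, -, hbx, hD⟩ := hv
      rw [if_neg (by push_neg; exact ⟨by omega, hD⟩)]
      exact ih (j + 1) (by omega) (by omega) (by omega)
    · rw [if_neg hv]
      rw [isvalid_iff] at hv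
      push_neg at hv
      have : j = lx - 1 ∨ chAt board i (j + 1) = 'D' := by
        by_cases hz : j = lx - 1
        · exact Or.inl hz
        · exact Or.inr (hv hi0 hiy (by omega) (by omega))
      rw [if_pos this]

lemma slide_up (board : List String) (lx ly i j : Int) (fuel : Nat)
    (h : InR lx ly (i, j)) (hf : i.toNat < fuel) :
    slide board lx ly (-1, 0) fuel (i, j) = (valPos (fun t => chAt board t j) i, j) := by
  obtain ⟨hi0, hiy, hj0, hjx⟩ := h
  simp only at hi0 hiy hj0 hjx
  induction fuel generalizing i with
  | zero => omega
  | succ f ih =>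
    simp only [slide]
    have e1 : j + (0 : Int) = j := by ring
    have e2 : i + (-1 : Int) = i - 1 := by ring
    rw [e1, e2, valPos_rec _ _ hi0]
    by_cases hv : isvalid (i - 1) j lx ly board = true
    · rw [if_pos hv]
      rw [isvalid_iff] at hv
      obtain ⟨ha0, -, -, -, hD⟩ := hv
      rw [if_neg (by push_neg; exact ⟨by omega, hD⟩)]
      exact ih (i - 1) (by omega) (by omega) (by omega)
    · rw [if_neg hv]
      rw [isvalid_iff] at hv
      push_neg at hv
      have : i = 0 ∨ chAt board (i - 1) j = 'D' := by
        by_cases hz : i = 0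
        · exact Or.inl hz
        · exact Or.inr (hv (by omega) (by omega) hj0 hjx)
      rw [if_pos this]

lemma slide_down (board : List String) (lx ly i j : Int) (fuel : Nat)
    (h : InR lx ly (i, j)) (hf : (ly - 1 - i).toNat < fuel) :
    slide board lx ly (1, 0) fuel (i, j) = (valNeg (fun t => chAt board t j) ly i, j) := by
  obtain ⟨hi0, hiy, hj0, hjx⟩ := h
  simp only at hi0 hiy hj0 hjx
  induction fuel generalizing i with
  | zero => omega
  | succ f ih =>
    simp only [slide]
    have e1 : j + (0 : Int) = j := by ring
    rw [e1, valNeg_rec _ _ _ hi0 hiy]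
    by_cases hv : isvalid (i + 1) j lx ly board = true
    · rw [if_pos hv]
      rw [isvalid_iff] at hv
      obtain ⟨-, hay, -, -, hD⟩ := hv
      rw [if_neg (by push_neg; exact ⟨by omega, hD⟩)]
      exact ih (i + 1) (by omega) (by omega) (by omega)
    · rw [if_neg hv]
      rw [isvalid_iff] at hv
      push_neg at hv
      have : i = ly - 1 ∨ chAt board (i + 1) j = 'D' := by
        by_cases hz : i = ly - 1
        · exact Or.inl hz
        · exact Or.inr (hv (by omega) (by omega) hj0 hjx)
      rw [if_pos this]

lemma sweepPos_aux (f : Int → Char) (N : Nat) :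
    (List.range N).foldl (fun row (k : Nat) =>
      row ++ [if ((k : Int)) == 0 || f ((k : Int) - 1) == 'D' then ((k : Int)) else PySem.List.pyGetD row (-1) 0]) [] =
    (List.range N).map (posSpec f) := by
  induction N with
  | zero => simp
  | succ M ih =>
    rw [List.range_succ, List.foldl_append, List.map_append, ih]
    simp only [List.foldl_cons, List.foldl_nil]
    congr 1
    cases M with
    | zero => simp [posSpec]
    | succ K =>
      have hne : ((((K + 1 : Nat) : Int)) == 0) = false := by
        rw [beq_eq_false_iff_ne]; push_cast; omega
      rw [List.range_succ, List.map_append]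
      simp only [List.map_cons, List.map_nil, hne, Bool.false_or]
      rw [PySem.List.pyGetD_neg_one_append_singleton]
      simp only [posSpec]
      have e : ((K + 1 : Nat) : Int) - 1 = (K : Int) := by push_cast; ring
      rw [e]
      by_cases hD : f (K : Int) = 'D' <;> simp [hD] <;> push_cast <;> ring

lemma sweepPos_eq (f : Int → Char) (n : Int) :
    sweepPos f n = (List.range n.toNat).map (posSpec f) := by
  unfold sweepPos
  rw [PySem.List.pyRange_one, List.foldl_map]
  have e : (n - 0).toNat = n.toNat := by omega
  rw [e, ← sweepPos_aux f n.toNat]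
  congr 1
  funext row k
  simp

lemma sweepNeg_aux (f : Int → Char) (n : Int) (N : Nat) :
    (List.range N).foldl (fun row (k : Nat) =>
      row ++ [if (n - 1 - (k : Int)) == n - 1 || f ((n - 1 - (k : Int)) + 1) == 'D' then (n - 1 - (k : Int)) else PySem.List.pyGetD row (-1) 0]) [] =
    (List.range N).map (negSpec f n) := by
  induction N with
  | zero => simp
  | succ M ih =>
    rw [List.range_succ, List.foldl_append, List.map_append, ih]
    simp only [List.foldl_cons, List.foldl_nil]
    congr 1
    cases M with
    | zero => simp [negSpec]
    | succ K =>
      have hne : ((n - 1 - ((K + 1 : Nat) : Int)) == n - 1) = false := by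
        rw [beq_eq_false_iff_ne]; push_cast; omega
      rw [List.range_succ, List.map_append]
      simp only [List.map_cons, List.map_nil, hne, Bool.false_or]
      rw [PySem.List.pyGetD_neg_one_append_singleton]
      simp only [negSpec]
      have e : (n - 1 - ((K + 1 : Nat) : Int)) + 1 = n - 1 - (K : Int) := by push_cast; ring
      rw [e]
      by_cases hD : f (n - 1 - (K : Int)) = 'D' <;> simp [hD] <;> push_cast <;> ring

lemma sweepNeg_eq (f : Int → Char) (n : Int) :
    sweepNeg f n = ((List.range n.toNat).map (negSpec f n)).reverse := by
  unfold sweepNeg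
  rw [PySem.List.pyRange_neg_one, List.foldl_map]
  have e : (n - 1 - -1).toNat = n.toNat := by omega
  rw [e, ← sweepNeg_aux f n n.toNat]

lemma pyGetD_pos_list (f : Int → Char) (n j : Int) (h0 : 0 ≤ j) (h1 : j < n) :
    PySem.List.pyGetD (sweepPos f n) j 0 = valPos f j := by
  rw [sweepPos_eq, PySem.List.pyGetD_eq_getElem _ _ h0 (by simp; omega)]
  simp only [List.getElem_map, List.getElem_range]
  rfl

lemma pyGetD_neg_list (f : Int → Char) (n j : Int) (h0 : 0 ≤ j) (h1 : j < n) :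
    PySem.List.pyGetD (sweepNeg f n) j 0 = valNeg f n j := by
  rw [sweepNeg_eq, PySem.List.pyGetD_eq_getElem _ _ h0 (by simp; omega)]
  rw [List.getElem_reverse]
  simp only [List.getElem_map, List.getElem_range, List.length_map, List.length_range]
  unfold valNeg
  congr 1
  omega

lemma tget_tblL (board : List String) (lx ly i j : Int) (h : InR lx ly (i, j)) :
    tget (tblL board lx ly) i j = valPos (fun t => chAt board i t) j := by
  obtain ⟨hi0, hiy, hj0, hjx⟩ := h
  unfold tget tblL
  rw [PySem.List.pyGetD_map_pyRange_of_nonneg _ ly i [] hi0 hiy]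
  exact pyGetD_pos_list _ lx j hj0 hjx

lemma tget_tblR (board : List String) (lx ly i j : Int) (h : InR lx ly (i, j)) :
    tget (tblR board lx ly) i j = valNeg (fun t => chAt board i t) lx j := by
  obtain ⟨hi0, hiy, hj0, hjx⟩ := h
  unfold tget tblR
  rw [PySem.List.pyGetD_map_pyRange_of_nonneg _ ly i [] hi0 hiy]
  exact pyGetD_neg_list _ lx j hj0 hjx

lemma tget_tblU (board : List String) (lx ly i j : Int) (h : InR lx ly (i, j)) :
    tget (tblU board lx ly) j i = valPos (fun t => chAt board t j) i := by
  obtain ⟨hi0, hiy, hj0, hjx⟩ := h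
  unfold tget tblU
  rw [PySem.List.pyGetD_map_pyRange_of_nonneg _ lx j [] hj0 hjx]
  exact pyGetD_pos_list _ ly i hi0 hiy

lemma tget_tblD (board : List String) (lx ly i j : Int) (h : InR lx ly (i, j)) :
    tget (tblD board lx ly) j i = valNeg (fun t => chAt board t j) ly i := by
  obtain ⟨hi0, hiy, hj0, hjx⟩ := h
  unfold tget tblD
  rw [PySem.List.pyGetD_map_pyRange_of_nonneg _ lx j [] hj0 hjx]
  exact pyGetD_neg_list _ ly i hi0 hiy

lemma shape_mset (lx ly : Int) (m : List (List (Option Int))) (hsh : Shape lx ly m)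
    (c : Int × Int) (hc : InR lx ly c) (v : Option Int) : Shape lx ly (mset m c v) := by
  obtain ⟨hlen, hrow⟩ := hsh
  obtain ⟨hi0, hiy, hj0, hjx⟩ := hc
  unfold mset
  rw [PySem.List.pySetD_of_nonneg _ _ hi0, PySem.List.pySetD_of_nonneg _ _ hj0]
  refine ⟨by simp [hlen], ?_⟩
  intro r hr
  rcases List.mem_or_eq_of_mem_set hr with h | h
  · exact hrow r h
  · subst h
    rw [List.length_set]
    by_cases hin : c.1 < (m.length : Int)
    · rw [PySem.List.pyGetD_eq_getElem _ _ hi0 hin]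
      exact hrow _ (List.getElem_mem _)
    · exfalso; omega

lemma mget_mset (lx ly : Int) (m : List (List (Option Int))) (hsh : Shape lx ly m)
    (c : Int × Int) (hc : InR lx ly c) (v : Option Int) (c' : Int × Int) (hc' : InR lx ly c') :
    mget (mset m c v) c' = if c' = c then v else mget m c' := by
  obtain ⟨hlen, hrowlen⟩ := hsh
  obtain ⟨hi0, hiy, hj0, hjx⟩ := hc
  obtain ⟨hi0', hiy', hj0', hjx'⟩ := hc'
  have hb1 : c.1.toNat < m.length := by omega
  have hrl : ∀ (k : Nat) (hk : k < m.length), (m[k]).length = lx.toNat :=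
    fun k hk => hrowlen _ (List.getElem_mem _)
  have hmset : mset m c v = m.set c.1.toNat ((m[c.1.toNat]'hb1).set c.2.toNat v) := by
    unfold mset
    rw [PySem.List.pySetD_of_nonneg _ _ hi0, PySem.List.pySetD_of_nonneg _ _ hj0,
        PySem.List.pyGetD_eq_getElem _ _ hi0 (by omega)]
  have hb1' : c'.1.toNat < m.length := by omega
  unfold mget
  rw [hmset]
  rw [PySem.List.pyGetD_eq_getElem _ _ hi0' (by rw [List.length_set]; omega)]
  rw [List.getElem_set]
  by_cases hr : c.1.toNat = c'.1.toNat
  · rw [if_pos hr]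
    rw [PySem.List.pyGetD_eq_getElem _ _ hj0'
      (by rw [List.length_set, hrl _ hb1]; omega)]
    rw [List.getElem_set]
    by_cases hcol : c.2.toNat = c'.2.toNat
    · rw [if_pos hcol, if_pos (show c' = c from Prod.ext (by omega) (by omega))]
    · have hne : c' ≠ c := fun hh => hcol (by rw [hh])
      rw [if_neg hcol, if_neg hne]
      rw [PySem.List.pyGetD_eq_getElem _ _ hi0' (by omega),
          PySem.List.pyGetD_eq_getElem _ _ hj0' (by rw [hrl _ hb1']; omega)]
      simp only [hr]
  · have hne : c' ≠ c := fun hh => hr (by rw [hh])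
    rw [if_neg hr, if_neg hne]
    rw [PySem.List.pyGetD_eq_getElem _ _ hi0' (by omega)]

lemma mget_replicate (lx ly : Int) (c : Int × Int) (hc : InR lx ly c) :
    mget (List.replicate ly.toNat (List.replicate lx.toNat (none : Option Int))) c = none := by
  obtain ⟨hi0, hiy, hj0, hjx⟩ := hc
  unfold mget
  rw [PySem.List.pyGetD_eq_getElem _ _ hi0 (by simp; omega)]
  rw [List.getElem_replicate]
  rw [PySem.List.pyGetD_eq_getElem _ _ hj0 (by simp; omega)]
  rw [List.getElem_replicate]

lemma step_one (lx ly : Int) (c : Int × Int) (d : Int) (t : Int × Int)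
    (sA : List (Int × Int) × List (List (Option Int)))
    (sB : List (Int × Int) × PySem.Dict (Int × Int) Int)
    (h : StInv lx ly c d sA sB) (ht : InR lx ly t) :
    StInv lx ly c d
      (if t == c then sA
       else if ltInf (d + 1) (mget sA.2 t) then (sA.1 ++ [t], mset sA.2 t (some (d + 1))) else sA)
      (if PySem.Dict.getD sB.2 t (d + 2) > d + 1 then (sB.1 ++ [t], PySem.Dict.insert sB.2 t (d + 1)) else sB) := by
  obtain ⟨hq, hshape, hrel, hmem, hc⟩ := h
  rw [PySem.Dict.getD_eq_get?_getD]
  by_cases he : t = c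
  · subst he
    rw [if_pos (by simp), hc]
    simp only [Option.getD_some]
    rw [if_neg (by omega)]
    exact ⟨hq, hshape, hrel, hmem, hc⟩
  · have hupd : StInv lx ly c d (sA.1 ++ [t], mset sA.2 t (some (d + 1)))
        (sB.1 ++ [t], PySem.Dict.insert sB.2 t (d + 1)) := by
      refine ⟨by rw [hq], shape_mset _ _ _ hshape t ht _, ?_, ?_, ?_⟩
      · intro x hx
        rw [mget_mset lx ly sA.2 hshape t ht _ x hx]
        by_cases hxt : x = t
        · subst hxt
          rw [if_pos rfl, PySem.Dict.get?_insert_self]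
        · rw [if_neg hxt, PySem.Dict.get?_insert_of_ne _ _ hxt]
          exact hrel x hx
      · intro x hx
        simp only [List.mem_append, List.mem_singleton] at hx
        rcases hx with hx | hx
        · obtain ⟨hxr, hxs⟩ := hmem x hx
          refine ⟨hxr, ?_⟩
          by_cases hxt : x = t
          · subst hxt
            simp [PySem.Dict.get?_insert_self]
          · rw [PySem.Dict.get?_insert_of_ne _ _ hxt]
            exact hxs
        · subst hx
          exact ⟨ht, by simp [PySem.Dict.get?_insert_self]⟩
      · rw [PySem.Dict.get?_insert_of_ne _ _ (fun hh => he hh.symm)]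
        exact hc
    rw [if_neg (by simpa using he)]
    have hmt : mget sA.2 t = PySem.Dict.get? sB.2 t := hrel t ht
    cases hgt : PySem.Dict.get? sB.2 t with
    | none =>
      simp only [Option.getD_none]
      have hgt2 : d + 2 > d + 1 := by omega
      have hlt : ltInf (d + 1) (mget sA.2 t) = true := by
        rw [hmt, hgt]; simp [ltInf]
      rw [if_pos hgt2, if_pos hlt]
      exact hupd
    | some v =>
      simp only [Option.getD_some]
      have hlt : ltInf (d + 1) (mget sA.2 t) = decide (d + 1 < v) := by
        rw [hmt, hgt]; simp [ltInf]
      by_cases hv : v > d + 1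
      · rw [if_pos hv, hlt, if_pos (by simpa using hv)]
        exact hupd
      · rw [if_neg hv, hlt, if_neg (by simpa using hv)]
        exact ⟨hq, hshape, hrel, hmem, hc⟩

lemma fold_corr (lx ly : Int) (c : Int × Int) (d : Int) (ts : List (Int × Int))
    (hts : ∀ t ∈ ts, InR lx ly t)
    (sA : List (Int × Int) × List (List (Option Int)))
    (sB : List (Int × Int) × PySem.Dict (Int × Int) Int)
    (h : StInv lx ly c d sA sB) :
    StInv lx ly c d
      (ts.foldl (fun s t =>
        if t == c then s
        else if ltInf (d + 1) (mget s.2 t) then (s.1 ++ [t], mset s.2 t (some (d + 1))) else s) sA)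
      (ts.foldl (fun s t =>
        if PySem.Dict.getD s.2 t (d + 2) > d + 1 then (s.1 ++ [t], PySem.Dict.insert s.2 t (d + 1)) else s) sB) := by
  induction ts generalizing sA sB with
  | nil => exact h
  | cons t ts ih =>
    simp only [List.foldl_cons]
    exact ih (fun x hx => hts x (List.mem_cons_of_mem _ hx)) _ _
      (step_one lx ly c d t sA sB h (hts t (List.mem_cons_self ..)))

lemma targets_map (board : List String) (lx ly ci cj : Int) (hc : InR lx ly (ci, cj)) :
    dirList.map (fun dr => slide board lx ly dr ((lx + ly).toNat + 1) (ci, cj)) =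
      [(valPos (fun t => chAt board t cj) ci, cj), (valNeg (fun t => chAt board t cj) ly ci, cj),
       (ci, valPos (fun t => chAt board ci t) cj), (ci, valNeg (fun t => chAt board ci t) lx cj)] := by
  obtain ⟨hi0, hiy, hj0, hjx⟩ := hc
  simp only [dirList, List.map_cons, List.map_nil]
  rw [slide_up board lx ly ci cj _ ⟨hi0, hiy, hj0, hjx⟩ (by omega),
      slide_down board lx ly ci cj _ ⟨hi0, hiy, hj0, hjx⟩ (by omega),
      slide_left board lx ly ci cj _ ⟨hi0, hiy, hj0, hjx⟩ (by omega),
      slide_right board lx ly ci cj _ ⟨hi0, hiy, hj0, hjx⟩ (by omega)]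

lemma bfs_corr (board : List String) (lx ly : Int) :
    ∀ (fuel : Nat) (q : List (Int × Int)) (m : List (List (Option Int)))
      (dist : PySem.Dict (Int × Int) Int),
      Shape lx ly m → MRel lx ly m dist →
      (∀ x ∈ q, InR lx ly x ∧ (PySem.Dict.get? dist x).isSome = true) →
      ∀ c', InR lx ly c' →
        mget (bfsA board lx ly fuel q m) c' =
          PySem.Dict.get? (bfsB (tblU board lx ly) (tblD board lx ly) (tblL board lx ly)
            (tblR board lx ly) fuel q dist) c' := by
  intro fuel
  induction fuel with
  | zero =>
    intro q m dist hsh hrel hq c' hc'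
    simp only [bfsA, bfsB]
    exact hrel c' hc'
  | succ f ih =>
    intro q m dist hsh hrel hq c' hc'
    cases q with
    | nil =>
      simp only [bfsA, bfsB]
      exact hrel c' hc'
    | cons c rest =>
      obtain ⟨ci, cj⟩ := c
      obtain ⟨hcInR, hcSome⟩ := hq (ci, cj) (List.mem_cons_self ..)
      have hcd : PySem.Dict.get? dist (ci, cj) = some ((PySem.Dict.get? dist (ci, cj)).getD 0) := by
        rcases hh : PySem.Dict.get? dist (ci, cj) with _ | v
        · rw [hh] at hcSome; simp at hcSome
        · simp
      have hstep : (mget m (ci, cj)).getD 0 = (PySem.Dict.get? dist (ci, cj)).getD 0 := by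
        rw [hrel _ hcInR]
      set d : Int := (PySem.Dict.get? dist (ci, cj)).getD 0 with hd
      have hkey : StInv lx ly (ci, cj) d
          ((dirList.map (fun dr => slide board lx ly dr ((lx + ly).toNat + 1) (ci, cj))).foldl
            (fun s t => if t == (ci, cj) then s
              else if ltInf (d + 1) (mget s.2 t) then (s.1 ++ [t], mset s.2 t (some (d + 1))) else s)
            (rest, m))
          ([(tget (tblU board lx ly) cj ci, cj), (tget (tblD board lx ly) cj ci, cj),
            (ci, tget (tblL board lx ly) ci cj), (ci, tget (tblR board lx ly) ci cj)].foldl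
            (fun s t => if PySem.Dict.getD s.2 t (d + 2) > d + 1
              then (s.1 ++ [t], PySem.Dict.insert s.2 t (d + 1)) else s)
            (rest, dist)) := by
        rw [targets_map board lx ly ci cj hcInR,
            tget_tblU board lx ly ci cj hcInR, tget_tblD board lx ly ci cj hcInR,
            tget_tblL board lx ly ci cj hcInR, tget_tblR board lx ly ci cj hcInR]
        refine fold_corr lx ly (ci, cj) d _ ?_ (rest, m) (rest, dist)
          ⟨rfl, hsh, hrel, fun x hx => hq x (List.mem_cons_of_mem _ hx), hcd⟩
        intro t hht
        obtain ⟨hi0, hiy, hj0, hjx⟩ := hcInR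
        have bU := valPos_bounds (fun t => chAt board t cj) ci hi0
        have bD := valNeg_bounds (fun t => chAt board t cj) ly ci hi0 hiy
        have bL := valPos_bounds (fun t => chAt board ci t) cj hj0
        have bR := valNeg_bounds (fun t => chAt board ci t) lx cj hj0 hjx
        simp only [List.mem_cons, List.not_mem_nil, or_false] at hht
        rcases hht with rfl | rfl | rfl | rfl
        · exact ⟨by omega, by omega, hj0, hjx⟩
        · exact ⟨by omega, by omega, hj0, hjx⟩
        · exact ⟨hi0, hiy, by omega, by omega⟩
        · exact ⟨hi0, hiy, by omega, by omega⟩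
      obtain ⟨hq', hsh', hrel', hmem', -⟩ := hkey
      show mget (bfsA board lx ly (f + 1) ((ci, cj) :: rest) m) c' = _
      have eA : bfsA board lx ly (f + 1) ((ci, cj) :: rest) m =
          bfsA board lx ly f
            ((dirList.map (fun dr => slide board lx ly dr ((lx + ly).toNat + 1) (ci, cj))).foldl
              (fun s t => if t == (ci, cj) then s
                else if ltInf (d + 1) (mget s.2 t) then (s.1 ++ [t], mset s.2 t (some (d + 1))) else s)
              (rest, m)).1
            ((dirList.map (fun dr => slide board lx ly dr ((lx + ly).toNat + 1) (ci, cj))).foldl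
              (fun s t => if t == (ci, cj) then s
                else if ltInf (d + 1) (mget s.2 t) then (s.1 ++ [t], mset s.2 t (some (d + 1))) else s)
              (rest, m)).2 := by
        simp only [bfsA, hstep, List.foldl_map]
      have eB : bfsB (tblU board lx ly) (tblD board lx ly) (tblL board lx ly) (tblR board lx ly)
            (f + 1) ((ci, cj) :: rest) dist =
          bfsB (tblU board lx ly) (tblD board lx ly) (tblL board lx ly) (tblR board lx ly) f
            ([(tget (tblU board lx ly) cj ci, cj), (tget (tblD board lx ly) cj ci, cj),
              (ci, tget (tblL board lx ly) ci cj), (ci, tget (tblR board lx ly) ci cj)].foldl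
              (fun s t => if PySem.Dict.getD s.2 t (d + 2) > d + 1
                then (s.1 ++ [t], PySem.Dict.insert s.2 t (d + 1)) else s)
              (rest, dist)).1
            ([(tget (tblU board lx ly) cj ci, cj), (tget (tblD board lx ly) cj ci, cj),
              (ci, tget (tblL board lx ly) ci cj), (ci, tget (tblR board lx ly) ci cj)].foldl
              (fun s t => if PySem.Dict.getD s.2 t (d + 2) > d + 1
                then (s.1 ++ [t], PySem.Dict.insert s.2 t (d + 1)) else s)
              (rest, dist)).2 := by
        simp only [bfsB]
        rw [← hd]
      rw [eA, eB, hq']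
      exact ih _ _ _ hsh' hrel' (by rw [← hq']; exact hmem') c' hc'

lemma findRG_InR (board : List String) (lx ly : Int) (hlx : 0 < lx) (hly : 0 < ly) :
    InR lx ly (findRG board lx ly).1 ∧ InR lx ly (findRG board lx ly).2 := by
  unfold findRG
  have hinit : InR lx ly ((0 : Int), (0 : Int)) ∧ InR lx ly ((0 : Int), (0 : Int)) :=
    ⟨⟨le_refl 0, hly, le_refl 0, hlx⟩, ⟨le_refl 0, hly, le_refl 0, hlx⟩⟩
  refine List.foldlRecOn (motive := fun (st : (Int × Int) × (Int × Int)) => InR lx ly st.1 ∧ InR lx ly st.2) _ _ hinit ?_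
  intro st hst i hi
  refine List.foldlRecOn (motive := fun (st : (Int × Int) × (Int × Int)) => InR lx ly st.1 ∧ InR lx ly st.2) _ _ hst ?_
  intro b hb j hj
  rw [PySem.List.mem_pyRange_one] at hi hj
  dsimp only
  split_ifs with h1 h2
  · exact ⟨⟨hi.1, hi.2, hj.1, hj.2⟩, hb.2⟩
  · exact ⟨hb.1, hi.1, hi.2, hj.1, hj.2⟩
  · exact hb

lemma main_eq (board : List String)
    (hlx : 0 < PySem.Str.len ((PySem.List.pyGet? board 0).getD ""))
    (hly : 0 < PySem.List.len board) : solution board = solution_alt board := by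
  simp only [solution, solution_alt]
  set LX := PySem.Str.len ((PySem.List.pyGet? board 0).getD "") with hLX
  set LY := PySem.List.len board with hLY
  have hrg := findRG_InR board LX LY hlx hly
  have hshape0 : Shape LX LY (List.replicate LY.toNat (List.replicate LX.toNat (none : Option Int))) := by
    refine ⟨by simp, fun r hr => ?_⟩
    rw [List.eq_of_mem_replicate hr]
    simp
  have hsh0 := shape_mset LX LY _ hshape0 (findRG board LX LY).1 hrg.1 (some 0)
  have hrel0 : MRel LX LY
      (mset (List.replicate LY.toNat (List.replicate LX.toNat (none : Option Int))) (findRG board LX LY).1 (some 0))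
      (PySem.Dict.insert PySem.Dict.empty (findRG board LX LY).1 0) := by
    intro x hx
    rw [mget_mset LX LY _ hshape0 (findRG board LX LY).1 hrg.1 (some 0) x hx]
    by_cases hxs : x = (findRG board LX LY).1
    · subst hxs
      rw [if_pos rfl, PySem.Dict.get?_insert_self]
    · rw [if_neg hxs, PySem.Dict.get?_insert_of_ne _ _ hxs, PySem.Dict.get?_empty,
          mget_replicate LX LY x hx]
  have hq0 : ∀ x ∈ [(findRG board LX LY).1], InR LX LY x ∧
      ((PySem.Dict.insert PySem.Dict.empty (findRG board LX LY).1 (0 : Int)).get? x).isSome = true := by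
    intro x hx
    simp only [List.mem_singleton] at hx
    subst hx
    exact ⟨hrg.1, by simp [PySem.Dict.get?_insert_self]⟩
  have h := bfs_corr board LX LY ((LX.toNat + 1) * (LY.toNat + 1) + 1) [(findRG board LX LY).1]
    _ _ hsh0 hrel0 hq0 (findRG board LX LY).2 hrg.2
  rw [PySem.Dict.getD_eq_get?_getD, ← h]
  cases mget (bfsA board LX LY ((LX.toNat + 1) * (LY.toNat + 1) + 1) [(findRG board LX LY).1]
      (mset (List.replicate LY.toNat (List.replicate LX.toNat (none : Option Int))) (findRG board LX LY).1 (some 0)))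
      (findRG board LX LY).2 <;> simp

lemma pre_main (board : List String) (hpre : Pre_solution board) :
    0 < PySem.Str.len ((PySem.List.pyGet? board 0).getD "") ∧ 0 < PySem.List.len board := by
  obtain ⟨hne, hlen0, -⟩ := hpre
  obtain ⟨b, rest, rfl⟩ := List.exists_cons_of_ne_nil hne
  constructor
  · rw [PySem.List.pyGet?_zero_cons]
    simp only [Option.getD_some, PySem.Str.len_eq]
    simpa using hlen0
  · simp [PySem.List.len_eq]

-- ===== VERDICT (by name: the statement is the Claim_ definition above) =====
theorem solution_spec : Claim_equal_solution := by
  unfold Claim_equal_solution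
  intro board _ hpre
  unfold Spec_solution
  obtain ⟨hlx, hly⟩ := pre_main board hpre
  exact main_eq board hlx hly
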